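-- pv_equiv track=rewrite | github.com/mutharibayub/Competitive_Programming | adventOfCode/2023/day8/2.py | get_lcms
-- ===== SOURCE A (Python) =====
-- def gcd(a, b):
--     if a < b:
--         a, b = b, a
--     if not b:
--         return a
--     return gcd(b, a%b)
--
-- def lcm(a, b):
--     return a*b//gcd(a, b)
--
-- def get_lcms(li, idx, cur):
--     out = []
--     if idx == len(li):
--         return [cur]
--     for ele in li[idx]:
--         nCur = lcm(cur, ele)
--         out.extend(get_lcms(li, idx + 1, nCur))
--     return out
-- ===== SOURCE B (Python) =====
-- def gcd(a, b):
--     if a < b: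
--         a, b = b, a
--     if not b:
--         return a
--     return gcd(b, a%b)
--
-- def lcm(a, b):
--     return a*b//gcd(a, b)
--
-- def get_lcms(li, idx, cur):
--     # breadth-first: fold each remaining sublist into a growing list of partial LCMs
--     acc = [cur]
--     for row in li[idx:]:
--         acc = [lcm(c, e) for c in acc for e in row]
--     return acc
-- ===== Notes on version B (the rewrite author's own statement) =====
-- stated objective: alternative
-- what changed: Replaces A's depth-first index recursion (recursing per element with list.extend) by an iterative breadth-first fold: start from [cur] and, for each remaining sublist of li[idx:], replace the accumulator by all pairwise lcms, which yields the same lexicographic order without recursion.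
-- outside the precondition, e.g. on get_lcms([[2], [3]], -1, 1): A returns [6], B returns [3]
import Mathlib
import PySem

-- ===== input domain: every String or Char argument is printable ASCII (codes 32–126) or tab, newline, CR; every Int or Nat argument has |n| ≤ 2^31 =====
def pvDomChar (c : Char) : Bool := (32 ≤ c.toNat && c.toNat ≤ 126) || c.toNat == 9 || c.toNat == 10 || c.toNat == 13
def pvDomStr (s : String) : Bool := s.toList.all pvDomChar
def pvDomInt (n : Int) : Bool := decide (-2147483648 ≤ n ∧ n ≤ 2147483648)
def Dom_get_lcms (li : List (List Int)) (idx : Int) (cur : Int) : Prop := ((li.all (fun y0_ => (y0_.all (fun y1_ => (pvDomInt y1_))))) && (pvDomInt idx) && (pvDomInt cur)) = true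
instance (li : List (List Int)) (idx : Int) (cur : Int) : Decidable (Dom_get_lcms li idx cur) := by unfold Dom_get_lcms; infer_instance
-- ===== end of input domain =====

-- B replaces A's depth-first index recursion by an iterative breadth-first fold over the
-- remaining sublists (same output, same order); objective: alternative decomposition.


-- ===== PORT A =====
-- Python's gcd is an unbounded recursion; the fuel argument only makes it total
-- (it is ample for the nonnegative arguments Pre_ admits, where Python terminates).
def pygcd : Nat → Int → Int → Int
  | 0, _, _ => 0
  | f+1, a, b =>
    let p := if a < b then (b, a) else (a, b)   -- 'if a < b: a, b = b, a'
    if p.2 = 0 then p.1                          -- 'if not b: return a'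
    else pygcd f p.2 (PySem.Int.mod p.1 p.2)     -- 'return gcd(b, a%b)'

def pygcdCall (a b : Int) : Int := pygcd (a.natAbs + b.natAbs + 1) a b

def pylcm (a b : Int) : Int := PySem.Int.floordiv (a * b) (pygcdCall a b)

-- lemma the port's termination cites
theorem pyGet?_some_lt {α : Type} (xs : List α) (i : Int) (x : α)
    (h : PySem.List.pyGet? xs i = some x) : i < (xs.length : Int) := by
  by_contra hge
  have : PySem.List.pyGet? xs i = none := by
    rw [PySem.List.pyGet?_eq_none_iff]
    intro hin
    exact hge hin.2
  simp [this] at h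

def get_lcms (li : List (List Int)) (idx : Int) (cur : Int) : List Int :=
  if idx = (li.length : Int) then [cur]
  else
    match h : PySem.List.pyGet? li idx with
    | none => []        -- Python raises IndexError here (outside Pre_)
    | some row =>
      row.foldl (fun out ele => out ++ get_lcms li (idx + 1) (pylcm cur ele)) []
termination_by (2 * li.length - idx).toNat
decreasing_by
  have := pyGet?_some_lt li idx row h
  omega

-- ===== PORT B =====
def get_lcms_alt (li : List (List Int)) (idx : Int) (cur : Int) : List Int :=
  (PySem.List.slice li (some idx) none).foldl
    (fun acc row => acc.flatMap (fun c => row.map (fun e => pylcm c e)))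
    [cur]

-- ===== PRECONDITION & SPEC =====
-- Pre_ excludes: idx outside [0, len li] (negative idx is an unspecified corner where A's
-- value comes from Python's negative-index wraparound while continuing from 0, B's from the
-- slice li[idx:], neither specified; idx > len is an IndexError in A); and suffixes on which
-- Python's gcd/lcm helpers fail to return (negative values make gcd recurse forever, and a
-- second reachable zero makes lcm(0,0) divide by zero).  It is slightly narrower than that
-- reason on lists where an empty sublist precedes the second zero row (A returns [] there,
-- and so does B).
def Pre_get_lcms (li : List (List Int)) (idx : Int) (cur : Int) : Prop :=
  0 ≤ idx ∧ idx ≤ (li.length : Int) ∧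
  (li.drop idx.toNat = [] ∨
    (0 ≤ cur ∧
     (∀ r ∈ li.drop idx.toNat, ∀ e ∈ r, 0 ≤ e) ∧
     ((li.drop idx.toNat).filter (fun r => decide ((0:Int) ∈ r))).length ≤ 1 ∧
     (cur = 0 → ∀ r ∈ li.drop idx.toNat, (0:Int) ∉ r)))
instance (li : List (List Int)) (idx : Int) (cur : Int) : Decidable (Pre_get_lcms li idx cur) := by
  unfold Pre_get_lcms; infer_instance

def pvWitness_get_lcms : List (List Int) × Int × Int := ([[2, 3], [4]], 0, 1)

def Spec_get_lcms (li : List (List Int)) (idx : Int) (cur : Int) (out : List Int) : Prop := out = get_lcms_alt li idx cur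
instance (li : List (List Int)) (idx : Int) (cur : Int) (out : List Int) : Decidable (Spec_get_lcms li idx cur out) := by unfold Spec_get_lcms; infer_instance

-- ===== CLAIM (what is proved, stated in full; the proofs are below) =====
def Claim_equal_get_lcms : Prop := ∀ (li : List (List Int)) (idx : Int) (cur : Int), Dom_get_lcms li idx cur → Pre_get_lcms li idx cur → Spec_get_lcms li idx cur (get_lcms li idx cur)

-- ===== LEMMAS AND PROOFS =====

-- depth-first reference function both ports are reduced to
def dfs : List (List Int) → Int → List Int
  | [], cur => [cur]
  | row :: rest, cur => row.flatMap (fun e => dfs rest (pylcm cur e))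

theorem getLcms_eq_dfs (li : List (List Int)) :
    ∀ (n : Nat) (idx cur : Int), 0 ≤ idx → idx ≤ (li.length : Int) →
      li.length - idx.toNat = n →
      get_lcms li idx cur = dfs (li.drop idx.toNat) cur := by
  intro n
  induction n with
  | zero =>
    intro idx cur h0 h1 hn
    have hidx : idx = (li.length : Int) := by omega
    have hd : li.drop idx.toNat = [] := by
      apply List.drop_eq_nil_of_le; omega
    rw [get_lcms, if_pos hidx, hd, dfs]
  | succ m ih =>
    intro idx cur h0 h1 hn
    have hlt : idx < (li.length : Int) := by omega
    have hnat : idx.toNat < li.length := by omega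
    have hget : PySem.List.pyGet? li idx = some li[idx.toNat] :=
      PySem.List.pyGet?_eq_some_getElem li h0 hlt
    have hd : li.drop idx.toNat = li[idx.toNat] :: li.drop (idx.toNat + 1) :=
      List.drop_eq_getElem_cons hnat
    rw [get_lcms, if_neg (by omega)]
    have hstep : ∀ e : Int,
        get_lcms li (idx + 1) (pylcm cur e) = dfs (li.drop (idx.toNat + 1)) (pylcm cur e) := by
      intro e
      have h1' : (idx + 1).toNat = idx.toNat + 1 := by omega
      rw [ih (idx + 1) (pylcm cur e) (by omega) (by omega) (by omega), h1']
    split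
    · rename_i heq
      rw [hget] at heq
      cases heq
    · rename_i row heq
      rw [hget] at heq
      injection heq with heq
      subst heq
      rw [PySem.List.foldl_append_eq_flatMap, hd, dfs]
      simp only [List.nil_append]
      exact List.flatMap_congr (fun e _ => hstep e)

theorem bfs_eq_dfs :
    ∀ (rest : List (List Int)) (acc : List Int),
      rest.foldl (fun acc row => acc.flatMap (fun c => row.map (fun e => pylcm c e))) acc
        = acc.flatMap (fun c => dfs rest c) := by
  intro rest
  induction rest with
  | nil => intro acc; simp [dfs]
  | cons row rest ih =>
    intro acc
    rw [List.foldl_cons, ih]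
    rw [List.flatMap_assoc]
    apply List.flatMap_congr
    intro c _
    rw [dfs, List.flatMap_map]

-- ===== VERDICT (by name: the statement is the Claim_ definition above) =====
theorem get_lcms_spec : Claim_equal_get_lcms := by
  intro li idx cur _ hpre
  obtain ⟨h0, h1, -⟩ := hpre
  unfold Spec_get_lcms get_lcms_alt
  rw [PySem.List.slice_from li h0, bfs_eq_dfs]
  rw [getLcms_eq_dfs li (li.length - idx.toNat) idx cur h0 h1 rfl]
  simp
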